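-- pv_equiv track=rewrite | github.com/PermutaTriangle/Permuta | permuta/permutils/polynomial.py | in_L2
-- ===== SOURCE A (Python) =====
-- def in_L2(L):
--     n = len(L)
--     if n == 0 or n == 1:
--         return True
--     if L[-1] == n-1:
--         return in_L2(L[0:n-1])
--     elif L[-1] == n-1 and L[-2] == n-1:
--         return in_L2(L[0:n-2])
--     else:
--         return False
-- ===== SOURCE B (Python) =====
-- def in_L2(L):
--     for i in range(1, len(L)):
--         if L[i] != i:
--             return False
--     return True
-- ===== Notes on version B (the rewrite author's own statement) =====
-- stated objective: simpler
-- what changed: Replaces the prefix-slicing recursion (which copies a shrinking prefix at every step and carries a dead elif branch) with a single flat forward loop over indices 1..n-1 with early return.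
import Mathlib
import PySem

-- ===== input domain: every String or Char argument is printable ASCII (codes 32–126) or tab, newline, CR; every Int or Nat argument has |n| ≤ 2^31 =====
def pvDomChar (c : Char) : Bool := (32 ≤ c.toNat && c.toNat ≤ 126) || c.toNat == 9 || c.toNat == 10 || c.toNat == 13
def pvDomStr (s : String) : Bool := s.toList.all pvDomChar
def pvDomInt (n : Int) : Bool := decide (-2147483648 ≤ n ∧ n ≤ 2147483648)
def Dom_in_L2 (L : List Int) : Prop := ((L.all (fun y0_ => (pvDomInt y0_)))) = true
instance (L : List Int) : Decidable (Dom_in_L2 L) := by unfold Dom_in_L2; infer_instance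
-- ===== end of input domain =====

-- B replaces A's prefix-slicing recursion (dead elif branch included) with a flat
-- forward index loop with early return; objective: simpler.

-- ===== PORT A =====
def in_L2 (L : List Int) : Bool :=
  let n : Int := L.length
  if n = 0 ∨ n = 1 then true
  else if PySem.List.pyGet? L (-1) = some (n - 1) then
    in_L2 (PySem.List.slice L (some 0) (some (n - 1)))
  else if PySem.List.pyGet? L (-1) = some (n - 1) ∧ PySem.List.pyGet? L (-2) = some (n - 1) then
    in_L2 (PySem.List.slice L (some 0) (some (n - 2)))
  else false
termination_by L.length
decreasing_by
  all_goals simp only [PySem.List.length_slice, PySem.List.clampIdx] at *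
  all_goals split_ifs <;> omega

-- ===== PORT B =====
def in_L2_alt_loop (L : List Int) : List Int → Bool
  | [] => true
  | i :: rest =>
    if PySem.List.pyGet? L i ≠ some i then false
    else in_L2_alt_loop L rest

def in_L2_alt (L : List Int) : Bool :=
  in_L2_alt_loop L (PySem.List.pyRange 1 L.length 1)

-- ===== PRECONDITION & SPEC =====
def Spec_in_L2 (L : List Int) (out : Bool) : Prop := out = in_L2_alt L
instance (L : List Int) (out : Bool) : Decidable (Spec_in_L2 L out) := by unfold Spec_in_L2; infer_instance

-- ===== CLAIM (what is proved, stated in full; the proofs are below) =====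
def Claim_equal_in_L2 : Prop := ∀ (L : List Int), Dom_in_L2 L → Spec_in_L2 L (in_L2 L)

-- ===== LEMMAS AND PROOFS =====

theorem loop_append (L xs ys : List Int) :
    in_L2_alt_loop L (xs ++ ys) = (in_L2_alt_loop L xs && in_L2_alt_loop L ys) := by
  induction xs with
  | nil => simp [in_L2_alt_loop]
  | cons i rest ih =>
    simp only [List.cons_append, in_L2_alt_loop]
    split_ifs <;> simp [ih]

theorem loop_congr (L M xs : List Int)
    (h : ∀ i ∈ xs, PySem.List.pyGet? L i = PySem.List.pyGet? M i) :
    in_L2_alt_loop L xs = in_L2_alt_loop M xs := by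
  induction xs with
  | nil => rfl
  | cons i rest ih =>
    simp only [in_L2_alt_loop, h i (by simp)]
    split_ifs with hc
    · rfl
    · exact ih (fun j hj => h j (by simp [hj]))

-- A's one-step unfolding for length ≥ 2
theorem inL2_step (L : List Int) (h : 2 ≤ L.length) :
    in_L2 L = (decide (PySem.List.pyGet? L (-1) = some ((L.length : Int) - 1)) &&
               in_L2 L.dropLast) := by
  rw [in_L2]
  have h0 : ¬((L.length : Int) = 0 ∨ (L.length : Int) = 1) := by omega
  have hs : PySem.List.slice L (some 0) (some ((L.length : Int) - 1)) = L.dropLast := by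
    have : ((L.length : Int) - 1) = ((L.length - 1 : Nat) : Int) := by omega
    rw [this]
    simp [PySem.List.slice_zero_start, PySem.List.slice_to_natCast, List.dropLast_eq_take]
  simp only [h0, if_false, hs]
  split_ifs with h1 h2
  · simp [h1]
  · exact absurd h2.1 h1
  · simp [h1]

-- B's one-step unfolding for length ≥ 2
theorem inL2_alt_step (L : List Int) (h : 2 ≤ L.length) :
    in_L2_alt L = (decide (PySem.List.pyGet? L (-1) = some ((L.length : Int) - 1)) &&
                   in_L2_alt L.dropLast) := by
  unfold in_L2_alt
  have hsplit : PySem.List.pyRange 1 (L.length : Int) 1 =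
      PySem.List.pyRange 1 ((L.length : Int) - 1) 1 ++ [(L.length : Int) - 1] := by
    have heq := PySem.List.pyRange_one_succ_right (a := 1) (b := (L.length : Int) - 1) (by omega)
    rw [show ((L.length : Int) - 1) + 1 = (L.length : Int) from by omega] at heq
    exact heq
  have hlast : in_L2_alt_loop L [(L.length : Int) - 1] =
      decide (PySem.List.pyGet? L (-1) = some ((L.length : Int) - 1)) := by
    have hneg : PySem.List.pyGet? L ((L.length : Int) - 1) = PySem.List.pyGet? L (-1) := by
      rw [PySem.List.pyGet?_neg_one]
      have : ((L.length : Int) - 1) = ((L.length - 1 : Nat) : Int) := by omega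
      rw [this, PySem.List.pyGet?_natCast, List.getLast?_eq_getElem?]
    simp only [in_L2_alt_loop, hneg]
    split_ifs with hc <;> simp_all
  rw [hsplit, loop_append, hlast]
  have hpre : in_L2_alt_loop L (PySem.List.pyRange 1 ((L.length : Int) - 1) 1) =
      in_L2_alt_loop L.dropLast (PySem.List.pyRange 1 ((L.length : Int) - 1) 1) := by
    apply loop_congr
    intro i hi
    rw [PySem.List.mem_pyRange_one] at hi
    have : i = ((i.toNat : Nat) : Int) := by omega
    rw [this, PySem.List.pyGet?_natCast, PySem.List.pyGet?_natCast]
    rw [List.getElem?_dropLast, if_pos (by omega)]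
  have hdl : L.dropLast.length = L.length - 1 := by simp
  rw [hpre, hdl]
  have : ((L.length - 1 : Nat) : Int) = (L.length : Int) - 1 := by omega
  rw [this, Bool.and_comm]

theorem inL2_eq (L : List Int) : in_L2 L = in_L2_alt L := by
  by_cases h : 2 ≤ L.length
  · rw [inL2_step L h, inL2_alt_step L h,
      inL2_eq L.dropLast]
  · -- length 0 or 1: both are true
    have hb : in_L2_alt L = true := by
      unfold in_L2_alt
      rw [PySem.List.pyRange_one_eq_nil (by omega)]
      rfl
    rw [hb, in_L2]
    split_ifs with h1 h2 h3 <;> first | rfl | (exfalso; omega)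
termination_by L.length
decreasing_by simp; omega

-- ===== VERDICT (by name: the statement is the Claim_ definition above) =====
theorem in_L2_spec : Claim_equal_in_L2 := by
  intro L _
  unfold Spec_in_L2
  exact inL2_eq L
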